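-- pv_equiv track=rewrite | github.com/HariboobaalanPN/TechDose-Assignments | Array/Chocolate Distribution.py | chocolateDistribution
-- ===== SOURCE A (Python) =====
-- def chocolateDistribution(L, n):
--     left=[1]*n
--     right=[1]*n
--     for i in range(1,n):
--         if L[i]>L[i-1]:
--             left[i]=left[i-1]+1
--     for i in range(n-2,-1,-1):
--         if L[i]>L[i+1]:
--             right[i]=right[i+1]+1
--     max_chocolates=0
--     for i in range(n):
--         max_chocolates+=max(left[i],right[i])
--     return max_chocolates
-- ===== SOURCE B (Python) =====
-- def chocolateDistribution(L, n):
--     if n <= 0: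
--         return 0
--     total, up, down, peak = 1, 0, 0, 0
--     prev = L[0]
--     for x in L[1:n]:
--         if x > prev:
--             up += 1
--             down = 0
--             peak = up
--             total += 1 + up
--         elif x < prev:
--             down += 1
--             up = 0
--             total += 1 + down
--             if peak >= down:
--                 total -= 1
--         else:
--             up = down = peak = 0
--             total += 1
--         prev = x
--     return total
-- ===== Notes on version B (the rewrite author's own statement) =====
-- stated objective: faster
-- what changed: Replaces the three passes and two auxiliary left[]/right[] arrays with a single forward pass over L[1:n] maintaining four O(1) integer counters (total, up, down, peak) with a peak correction for descending runs.
-- outside the precondition, e.g. on chocolateDistribution([], 1): A returns 1, B raises IndexError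
import Mathlib
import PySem

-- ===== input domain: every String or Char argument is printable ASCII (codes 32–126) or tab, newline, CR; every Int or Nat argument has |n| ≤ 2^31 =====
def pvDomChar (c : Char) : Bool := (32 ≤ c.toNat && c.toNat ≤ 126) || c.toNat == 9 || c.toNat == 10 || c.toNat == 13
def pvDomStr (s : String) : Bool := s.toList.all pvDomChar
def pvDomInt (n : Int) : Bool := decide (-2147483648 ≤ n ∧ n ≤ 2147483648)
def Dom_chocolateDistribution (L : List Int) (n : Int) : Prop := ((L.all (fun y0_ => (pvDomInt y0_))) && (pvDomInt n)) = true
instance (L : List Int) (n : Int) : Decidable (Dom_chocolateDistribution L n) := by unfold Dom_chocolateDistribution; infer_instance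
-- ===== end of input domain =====

-- B replaces A's three passes and two auxiliary arrays by a single forward pass with
-- four integer counters (measured constant-factor faster); equal on Pre_ (n ≤ len L).


-- ===== PORT A =====
-- 'if L[i]>L[i-1]: left[i]=left[i-1]+1' (indices are in range on Pre_, so pyGetD is exact)
def stepLeftA (L : List Int) (lf : List Int) (i : Int) : List Int :=
  if PySem.List.pyGetD L i 0 > PySem.List.pyGetD L (i - 1) 0 then
    lf.set i.toNat (PySem.List.pyGetD lf (i - 1) 0 + 1)
  else lf

-- 'if L[i]>L[i+1]: right[i]=right[i+1]+1'
def stepRightA (L : List Int) (rt : List Int) (i : Int) : List Int :=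
  if PySem.List.pyGetD L i 0 > PySem.List.pyGetD L (i + 1) 0 then
    rt.set i.toNat (PySem.List.pyGetD rt (i + 1) 0 + 1)
  else rt

def chocolateDistribution (L : List Int) (n : Int) : Int :=
  let left := (PySem.List.pyRange 1 n).foldl (stepLeftA L) (List.replicate n.toNat 1)
  let right := (PySem.List.pyRange (n - 2) (-1) (-1)).foldl (stepRightA L) (List.replicate n.toNat 1)
  (PySem.List.pyRange 0 n).foldl
    (fun acc i => acc + max (PySem.List.pyGetD left i 0) (PySem.List.pyGetD right i 0)) 0

-- ===== PORT B =====
-- state (prev, total, up, down, peak); one loop iteration of Source B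
def bstep (st : Int × Int × Int × Int × Int) (x : Int) : Int × Int × Int × Int × Int :=
  let (prev, total, up, down, peak) := st
  if x > prev then
    (x, total + 1 + (up + 1), up + 1, 0, up + 1)
  else if x < prev then
    let down' := down + 1
    let total' := total + 1 + down'
    (x, if peak ≥ down' then total' - 1 else total', 0, down', peak)
  else
    (x, total + 1, 0, 0, 0)

def chocolateDistribution_alt (L : List Int) (n : Int) : Int :=
  if n ≤ 0 then 0
  else
    ((PySem.List.slice L (some 1) (some n)).foldl bstep
      (PySem.List.pyGetD L 0 0, 1, 0, 0, 0)).2.1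

-- ===== PRECONDITION & SPEC =====
-- Pre_ excludes n > len(L): there A raises IndexError except at the degenerate (L=[], n=1),
-- where A's returned 1 never looks at L and B's natural read of L[0] raises.
def Pre_chocolateDistribution (L : List Int) (n : Int) : Prop := n ≤ (L.length : Int)
instance (L : List Int) (n : Int) : Decidable (Pre_chocolateDistribution L n) := by
  unfold Pre_chocolateDistribution; infer_instance

def pvWitness_chocolateDistribution : List Int × Int := ([1, 2, 2, 5, 3, 1], 6)

def Spec_chocolateDistribution (L : List Int) (n : Int) (out : Int) : Prop := out = chocolateDistribution_alt L n
instance (L : List Int) (n : Int) (out : Int) : Decidable (Spec_chocolateDistribution L n out) := by unfold Spec_chocolateDistribution; infer_instance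

-- ===== CLAIM (what is proved, stated in full; the proofs are below) =====
def Claim_equal_chocolateDistribution : Prop := ∀ (L : List Int) (n : Int), Dom_chocolateDistribution L n → Pre_chocolateDistribution L n → Spec_chocolateDistribution L n (chocolateDistribution L n)

-- ===== LEMMAS AND PROOFS =====

-- ---- pure models of the two computations ----

-- A's left[] array: left[i] = length of the strictly increasing run ending at i
def leftAux : Int → Int → List Int → List Int
  | _, _, [] => []
  | prev, l, x :: t =>
    let v := if x > prev then l + 1 else 1
    v :: leftAux x v t

def leftL : List Int → List Int
  | [] => []
  | x :: t => 1 :: leftAux x 1 t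

-- A's right[] array: right[i] = length of the strictly decreasing run starting at i
def rightL : List Int → List Int
  | [] => []
  | [_] => [1]
  | a :: b :: t => (if a > b then (rightL (b :: t)).headD 0 + 1 else 1) :: rightL (b :: t)

def ansL (xs : List Int) : Int := (List.zipWith max (leftL xs) (rightL xs)).sum

def bans : List Int → Int
  | [] => 0
  | x :: t => (t.foldl bstep (x, 1, 0, 0, 0)).2.1

-- [k, k-1, ..., 1] : rightL of a strictly decreasing run
def countdown : Nat → List Int
  | 0 => []
  | k + 1 => ((k : Int) + 1) :: countdown k

-- loop invariant of B relating its state to A's arrays on the processed prefix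
def INV (xs : List Int) (st : Int × Int × Int × Int × Int) : Prop :=
  ∃ pre run lp,
    xs = pre ++ run ∧ run ≠ [] ∧ List.IsChain (· > ·) run ∧
    xs.getLast? = some st.1 ∧
    st.2.1 = ansL xs ∧
    st.2.2.1 = (leftL xs).getLastD 0 - 1 ∧
    0 ≤ st.2.2.1 ∧ 0 ≤ st.2.2.2.2 ∧
    (run.length : Int) = st.2.2.2.1 + 1 ∧
    leftL xs = lp ++ (st.2.2.2.2 + 1) :: List.replicate st.2.2.2.1.toNat 1 ∧
    lp.length = pre.length ∧
    (∀ y ∈ pre.getLast?, ∀ z ∈ run.head?, ¬ y > z)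

-- ---- basic length facts ----

lemma leftAux_length : ∀ (t : List Int) (prev l : Int), (leftAux prev l t).length = t.length := by
  intro t; induction t with
  | nil => intro _ _; rfl
  | cons x t ih => intro prev l; simp [leftAux, ih]

lemma leftL_length (xs : List Int) : (leftL xs).length = xs.length := by
  cases xs with
  | nil => rfl
  | cons x t => simp [leftL, leftAux_length]

lemma rightL_length : ∀ (xs : List Int), (rightL xs).length = xs.length := by
  intro xs
  induction xs with
  | nil => rfl
  | cons a t ih =>
    cases t with
    | nil => rfl
    | cons b t' => simp [rightL] at ih ⊢; omega

lemma rightL_ne_nil {xs : List Int} (h : xs ≠ []) : rightL xs ≠ [] := by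
  intro hc
  have := rightL_length xs
  rw [hc] at this
  simp at this
  exact h (List.eq_nil_of_length_eq_zero this.symm)

-- ---- structural lemmas about rightL ----

lemma rightL_append : ∀ (p s : List Int),
    (∀ y ∈ p.getLast?, ∀ z ∈ s.head?, ¬ y > z) →
    rightL (p ++ s) = rightL p ++ rightL s := by
  intro p
  induction p with
  | nil => intro s _; simp [rightL]
  | cons a p ih =>
    intro s h
    cases p with
    | nil =>
      cases s with
      | nil => simp [rightL]
      | cons c t =>
        have hac : ¬ a > c := h a (by simp) c (by simp)
        simp [rightL, hac]
    | cons b p' =>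
      have h' : ∀ y ∈ (b :: p').getLast?, ∀ z ∈ s.head?, ¬ y > z := by
        intro y hy z hz
        exact h y (by simpa using hy) z hz
      have hrec := ih s h'
      simp only [List.cons_append] at hrec
      have hne : rightL (b :: p') ≠ [] := by
        intro hc; have := rightL_length (b :: p'); rw [hc] at this; simp at this
      obtain ⟨q, qs, hq⟩ := List.exists_cons_of_ne_nil hne
      show rightL (a :: b :: (p' ++ s)) = _
      rw [rightL, hrec, rightL, hq]
      simp

lemma rightL_chain : ∀ (xs : List Int), List.IsChain (· > ·) xs →
    rightL xs = countdown xs.length := by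
  intro xs
  induction xs with
  | nil => intro _; rfl
  | cons a t ih =>
    intro hch
    cases t with
    | nil => simp [rightL, countdown]
    | cons b t' =>
      rw [List.isChain_cons_cons] at hch
      have hr := ih hch.2
      rw [rightL, hr]
      have hlb : (b :: t').length = t'.length + 1 := rfl
      rw [hlb]
      simp [countdown, hch.1]

-- ---- structural lemmas about leftL ----

lemma leftAux_append : ∀ (t : List Int) (prev l x : Int),
    leftAux prev l (t ++ [x]) =
      leftAux prev l t ++
        [if x > t.getLastD prev then (leftAux prev l t).getLastD l + 1 else 1] := by
  intro t
  induction t with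
  | nil => intro prev l x; simp [leftAux]
  | cons y t ih =>
    intro prev l x
    simp only [List.cons_append, leftAux]
    rw [ih]
    simp only [List.getLastD_cons]

lemma leftL_snoc (xs : List Int) (x : Int) (h : xs ≠ []) :
    leftL (xs ++ [x]) =
      leftL xs ++ [if x > xs.getLastD 0 then (leftL xs).getLastD 0 + 1 else 1] := by
  cases xs with
  | nil => exact absurd rfl h
  | cons y t =>
    simp only [List.cons_append, leftL]
    rw [leftAux_append]
    simp only [List.getLastD_cons]

-- ---- countdown facts ----

lemma zip_rep_countdown : ∀ (d : Nat),
    List.zipWith max (List.replicate d 1) (countdown d) = countdown d := by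
  intro d; induction d with
  | zero => rfl
  | succ d ih =>
    simp only [List.replicate_succ, countdown, List.zipWith_cons_cons, ih]
    congr 1
    omega

-- ---- the core equivalence: B's one-pass state tracks A's arrays ----

lemma sum_zip_append (A B C D : List Int) (h : A.length = B.length) :
    (List.zipWith max (A ++ C) (B ++ D)).sum =
      (List.zipWith max A B).sum + (List.zipWith max C D).sum := by
  rw [List.zipWith_append h, List.sum_append]

lemma getLastD_of_getLast? {xs : List Int} {v : Int} (h : xs.getLast? = some v) :
    xs.getLastD 0 = v := by
  rw [List.getLastD_eq_getLast?, h]; rfl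

lemma inv_step (xs : List Int) (st : Int × Int × Int × Int × Int) (x : Int)
    (h : INV xs st) : INV (xs ++ [x]) (bstep st x) := by
  obtain ⟨prev, total, up, down, peak⟩ := st
  obtain ⟨pre, run, lp, hsplit, hrne, hch, hlast, htot, hup, hup0, hpk0, hlen, hleft, hlp, hbd⟩ := h
  dsimp only at hlast htot hup hup0 hpk0 hlen hleft
  have hxs_ne : xs ≠ [] := by
    rw [hsplit]; intro hc; exact hrne (List.append_eq_nil_iff.mp hc).2
  have hrunlast : run.getLast? = some prev := by
    rw [hsplit, List.getLast?_append_of_ne_nil _ hrne] at hlast; exact hlast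
  have hdown0 : 0 ≤ down := by
    have : 1 ≤ run.length := List.length_pos_iff.mpr hrne
    omega
  have hlastD : xs.getLastD 0 = prev := getLastD_of_getLast? hlast
  have hlastLeft : (leftL xs).getLastD 0 = up + 1 := by omega
  have hlenLR : (leftL xs).length = (rightL xs).length := by
    rw [leftL_length, rightL_length]
  rcases lt_trichotomy prev x with hlt | heq | hgt
  · -- ascent: x > prev
    have hb : bstep (prev, total, up, down, peak) x =
        (x, total + 1 + (up + 1), up + 1, 0, up + 1) := by
      simp [bstep, hlt]
    rw [hb]
    have hls : leftL (xs ++ [x]) = leftL xs ++ [up + 2] := by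
      rw [leftL_snoc xs x hxs_ne, hlastD, hlastLeft, if_pos hlt]
      have h2 : up + 1 + 1 = up + 2 := by omega
      rw [h2]
    have hbx : ∀ y ∈ xs.getLast?, ∀ z ∈ ([x] : List Int).head?, ¬ y > z := by
      intro y hy z hz
      rw [hlast] at hy
      simp at hy hz
      omega
    have hrs : rightL (xs ++ [x]) = rightL xs ++ [1] := by
      rw [rightL_append xs [x] hbx]
      rfl
    have hans : ansL (xs ++ [x]) = total + 1 + (up + 1) := by
      unfold ansL
      rw [hls, hrs, sum_zip_append _ _ _ _ hlenLR]
      have : (List.zipWith max [up + 2] [(1 : Int)]).sum = up + 2 := by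
        simp [List.zipWith]; omega
      rw [this]
      unfold ansL at htot; omega
    refine ⟨xs, [x], leftL xs, by simp, by simp, by simp, by simp, hans.symm, ?_, by dsimp only; omega,
      by dsimp only; omega, by dsimp only; norm_num, ?_, by rw [leftL_length], ?_⟩
    · dsimp only; rw [hls, List.getLastD_concat]; ring
    · dsimp only; rw [hls]; simp; omega
    · intro y hy z hz
      rw [hlast] at hy; simp at hy hz; omega
  · -- plateau: x == prev
    have hb : bstep (prev, total, up, down, peak) x = (x, total + 1, 0, 0, 0) := by
      simp [bstep, heq]
    rw [hb]
    have hls : leftL (xs ++ [x]) = leftL xs ++ [1] := by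
      rw [leftL_snoc xs x hxs_ne, hlastD, if_neg (by omega)]
    have hbx : ∀ y ∈ xs.getLast?, ∀ z ∈ ([x] : List Int).head?, ¬ y > z := by
      intro y hy z hz
      rw [hlast] at hy
      simp at hy hz
      omega
    have hrs : rightL (xs ++ [x]) = rightL xs ++ [1] := by
      rw [rightL_append xs [x] hbx]
      rfl
    have hans : ansL (xs ++ [x]) = total + 1 := by
      unfold ansL
      rw [hls, hrs, sum_zip_append _ _ _ _ hlenLR]
      have : (List.zipWith max [(1 : Int)] [(1 : Int)]).sum = 1 := by simp
      rw [this]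
      unfold ansL at htot; omega
    refine ⟨xs, [x], leftL xs, by simp, by simp, by simp, by simp, hans.symm, ?_, by dsimp only; omega,
      by dsimp only; omega, by dsimp only; norm_num, ?_, by rw [leftL_length], ?_⟩
    · dsimp only; rw [hls, List.getLastD_concat]; ring
    · dsimp only; rw [hls]; norm_num
    · intro y hy z hz
      rw [hlast] at hy; simp at hy hz; omega
  · -- descent: x < prev
    have hb : bstep (prev, total, up, down, peak) x =
        (x, if peak ≥ down + 1 then total + 1 + (down + 1) - 1 else total + 1 + (down + 1),
          0, down + 1, peak) := by
      simp [bstep, hgt, not_lt_of_gt hgt]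
    rw [hb]
    set dN := down.toNat with hdN
    have hdcast : (dN : Int) = down := by omega
    have hrl : run.length = dN + 1 := by omega
    have hch' : List.IsChain (· > ·) (run ++ [x]) := by
      rw [List.isChain_append]
      refine ⟨hch, by simp, ?_⟩
      intro a ha b hb'
      rw [hrunlast] at ha; simp at ha hb'; omega
    have hbd' : ∀ y ∈ pre.getLast?, ∀ z ∈ (run ++ [x]).head?, ¬ y > z := by
      intro y hy z hz
      obtain ⟨r0, rr, hr0⟩ := List.exists_cons_of_ne_nil hrne
      rw [hr0] at hz
      refine hbd y hy z ?_
      rw [hr0]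
      simpa using hz
    have hrxs : rightL xs = rightL pre ++ countdown (dN + 1) := by
      rw [hsplit, rightL_append pre run hbd, rightL_chain run hch, hrl]
    have hrxs' : rightL (xs ++ [x]) = rightL pre ++ countdown (dN + 2) := by
      rw [hsplit, List.append_assoc, rightL_append pre (run ++ [x]) hbd',
        rightL_chain (run ++ [x]) hch']
      simp [hrl]
    have hls : leftL (xs ++ [x]) = lp ++ (peak + 1) :: List.replicate (dN + 1) 1 := by
      rw [leftL_snoc xs x hxs_ne, hlastD, if_neg (by omega), hleft]
      rw [List.append_assoc]
      congr 1
      rw [List.replicate_succ']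
      simp
    have hlplen : lp.length = (rightL pre).length := by rw [rightL_length, hlp]
    have hcd_succ : ∀ k : Nat, countdown (k + 1) = ((k : Int) + 1) :: countdown k := by
      intro k; rfl
    have hzr : ∀ k : Nat, (List.zipWith max (List.replicate k 1) (countdown k)).sum =
        (countdown k).sum := by
      intro k; rw [zip_rep_countdown]
    have hans_old : total = (List.zipWith max lp (rightL pre)).sum +
        (max (peak + 1) ((dN : Int) + 1) + (countdown dN).sum) := by
      rw [htot]
      unfold ansL
      rw [hleft, hrxs, sum_zip_append _ _ _ _ hlplen, hcd_succ dN]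
      simp only [List.zipWith_cons_cons, List.sum_cons, hzr dN]
    have hans_new : ansL (xs ++ [x]) = (List.zipWith max lp (rightL pre)).sum +
        (max (peak + 1) ((dN : Int) + 2) + (((dN : Int) + 1) + (countdown dN).sum)) := by
      unfold ansL
      rw [hls, hrxs', sum_zip_append _ _ _ _ hlplen]
      rw [show dN + 2 = (dN + 1) + 1 from rfl, hcd_succ (dN + 1)]
      have hx1 : ((dN + 1 : Nat) : Int) + 1 = (dN : Int) + 2 := by push_cast; ring
      rw [List.zipWith_cons_cons, List.sum_cons, hzr (dN + 1), hcd_succ dN, List.sum_cons, hx1]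
    refine ⟨pre, run ++ [x], lp, by rw [hsplit, List.append_assoc], by simp, hch',
      by simp, ?_, ?_, le_refl 0, hpk0, ?_, ?_, hlp, hbd'⟩
    · dsimp only
      rw [hans_new]
      rcases max_cases (peak + 1) ((dN : Int) + 1) with ⟨h1, h2⟩ | ⟨h1, h2⟩ <;>
        rcases max_cases (peak + 1) ((dN : Int) + 2) with ⟨h3, h4⟩ | ⟨h3, h4⟩ <;>
          split_ifs <;> omega
    · dsimp only
      rw [hls]
      have h1 : lp ++ (peak + 1) :: List.replicate (dN + 1) 1 =
          (lp ++ (peak + 1) :: List.replicate dN 1) ++ [(1 : Int)] := by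
        rw [List.replicate_succ']
        simp
      rw [h1, List.getLastD_concat]
      ring
    · dsimp only; simp; omega
    · dsimp only
      have ht : (down + 1).toNat = dN + 1 := by omega
      rw [hls, ht]

lemma inv_fold (t : List Int) (x0 : Int) : INV (x0 :: t) (t.foldl bstep (x0, 1, 0, 0, 0)) := by
  induction t using List.reverseRecOn with
  | nil =>
    refine ⟨[], [x0], [], by simp, by simp, by simp, by simp, ?_, ?_, ?_, ?_, ?_, ?_, ?_, ?_⟩ <;>
      simp [ansL, leftL, leftAux, rightL]
  | append_singleton t x ih =>
    have := inv_step (x0 :: t) _ x ih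
    simpa [List.foldl_append] using this

lemma ansL_eq_bans : ∀ (xs : List Int), ansL xs = bans xs := by
  intro xs
  cases xs with
  | nil => rfl
  | cons x t =>
    obtain ⟨pre, run, lp, -, -, -, -, htot, -⟩ := inv_fold t x
    exact htot.symm ▸ rfl

-- ---- bridging port A to the pure model ----

lemma pyRange_down_eq (j : Nat) :
    PySem.List.pyRange (j : Int) (-1) (-1) = (List.range (j + 1)).map (fun k : Nat => (j : Int) - (k : Int)) := by
  simp only [PySem.List.pyRange, if_neg (show ¬((-1 : Int) = 0) by decide),
    if_neg (show ¬((0 : Int) < -1) by decide), if_pos (show (-1 : Int) < (j : Int) by omega)]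
  have hc : (((j : Int) - (-1) + - (-1) - 1) / - (-1)).toNat = j + 1 := by
    norm_num
  rw [hc]
  apply List.map_congr_left
  intro k _
  ring

lemma pyRange_down_neg : PySem.List.pyRange (-1) (-1) (-1) = [] := by decide

lemma pyRange_down_cons (j : Nat) :
    PySem.List.pyRange (j : Int) (-1) (-1) = (j : Int) :: PySem.List.pyRange ((j : Int) - 1) (-1) (-1) := by
  cases j with
  | zero =>
    rw [pyRange_down_eq]
    norm_num [pyRange_down_neg]
  | succ j' =>
    rw [pyRange_down_eq]
    have h1 : ((j' + 1 : Nat) : Int) - 1 = (j' : Int) := by push_cast; ring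
    rw [h1, pyRange_down_eq, List.range_succ_eq_map]
    simp only [List.map_cons, List.map_map]
    congr 1
    refine List.map_congr_left fun k hk => ?_
    simp only [Function.comp_apply]
    push_cast
    ring

lemma pyRange_self (m : Nat) : PySem.List.pyRange (m : Int) (m : Int) = [] := by
  rw [List.eq_nil_iff_forall_not_mem]
  intro x hx
  rw [PySem.List.mem_pyRange_one] at hx
  omega

lemma pyRange_one_empty (a b : Int) (h : b ≤ a) : PySem.List.pyRange a b = [] := by
  rw [List.eq_nil_iff_forall_not_mem]
  intro x hx
  rw [PySem.List.mem_pyRange_one] at hx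
  omega

lemma pyRange_down_empty (a : Int) (h : a ≤ -1) : PySem.List.pyRange a (-1) (-1) = [] := by
  simp only [PySem.List.pyRange, if_neg (show ¬((-1 : Int) = 0) by decide),
    if_neg (show ¬((0 : Int) < -1) by decide), if_neg (show ¬((-1 : Int) < a) by omega)]
  simp

lemma getD_last (l : List Int) (h : l ≠ []) (d : Int) : l.getD (l.length - 1) d = l.getLastD d := by
  rw [List.getD_eq_getElem _ _ (by cases l <;> simp_all), ← List.getLast_eq_getElem,
    List.getLastD_eq_getLast?, List.getLast?_eq_some_getLast h]
  rfl

lemma take_getLastD (L : List Int) (j : Nat) (h1 : 1 ≤ j) (h2 : j ≤ L.length) :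
    (L.take j).getLastD 0 = L.getD (j - 1) 0 := by
  obtain ⟨i, rfl⟩ : ∃ i, j = i + 1 := ⟨j - 1, by omega⟩
  have hj : i < L.length := by omega
  rw [List.take_succ, List.getElem?_eq_getElem hj]
  show (L.take i ++ [L[i]]).getLastD 0 = _
  rw [List.getLastD_concat]
  simp [List.getD, List.getElem?_eq_getElem hj]

lemma leftLoop (L : List Int) (m : Nat) (hm : m ≤ L.length) :
    ∀ (k j : Nat) (acc : List Int), j + k = m → 1 ≤ j →
    acc = leftL (L.take j) ++ List.replicate (m - j) 1 →
    (PySem.List.pyRange (j : Int) (m : Int)).foldl (stepLeftA L) acc = leftL (L.take m) := by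
  intro k
  induction k with
  | zero =>
    intro j acc hjk hj hacc
    obtain rfl : j = m := by omega
    rw [pyRange_self]
    simp [hacc]
  | succ k ih =>
    intro j acc hjk hj hacc
    have hjm : j < m := by omega
    have hjL : j < L.length := by omega
    have hlen_take : (L.take j).length = j := by rw [List.length_take]; omega
    have hllen : (leftL (L.take j)).length = j := by rw [leftL_length, hlen_take]
    have htne : L.take j ≠ [] := by
      intro hc; rw [hc] at hlen_take; simp at hlen_take; omega
    have hlne : leftL (L.take j) ≠ [] := by
      intro hc; rw [hc] at hllen; simp at hllen; omega
    rw [PySem.List.pyRange_one_cons (by exact_mod_cast hjm), List.foldl_cons]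
    have hg1 : PySem.List.pyGetD L (j : Int) 0 = L.getD j 0 := PySem.List.pyGetD_natCast L j 0
    have hg0 : PySem.List.pyGetD L ((j : Int) - 1) 0 = L.getD (j - 1) 0 := by
      rw [show (j : Int) - 1 = ((j - 1 : Nat) : Int) by omega]
      exact PySem.List.pyGetD_natCast L (j - 1) 0
    have hT1 : L.take (j + 1) = L.take j ++ [L.getD j 0] := by
      rw [List.take_succ, List.getElem?_eq_getElem hjL, List.getD_eq_getElem _ _ hjL]
      rfl
    have hsnoc := leftL_snoc (L.take j) (L.getD j 0) htne
    rw [take_getLastD L j hj (by omega)] at hsnoc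
    have hgacc : PySem.List.pyGetD acc ((j : Int) - 1) 0 = (leftL (L.take j)).getLastD 0 := by
      rw [show (j : Int) - 1 = ((j - 1 : Nat) : Int) by omega, PySem.List.pyGetD_natCast,
        hacc, List.getD_append _ _ _ _ (by omega), ← getD_last _ hlne]
      congr 1
      omega
    have hrep : List.replicate (m - j) (1 : Int) = 1 :: List.replicate (m - (j + 1)) 1 := by
      rw [show m - j = (m - (j + 1)) + 1 by omega, List.replicate_succ]
    have hset : ∀ v : Int, acc.set ((j : Int)).toNat v =
        leftL (L.take j) ++ v :: List.replicate (m - (j + 1)) 1 := by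
      intro v
      rw [Int.toNat_natCast, hacc, List.set_append, if_neg (by omega), hllen, Nat.sub_self,
        hrep]
      rfl
    rw [show ((j : Int) + 1) = ((j + 1 : Nat) : Int) by push_cast; ring]
    apply ih (j + 1) _ (by omega) (by omega)
    by_cases hc : L.getD j 0 > L.getD (j - 1) 0
    · rw [stepLeftA, if_pos (by rw [hg1, hg0]; exact hc), hgacc, hset]
      rw [hT1, hsnoc, if_pos hc, List.append_assoc]
      rfl
    · rw [stepLeftA, if_neg (by rw [hg1, hg0]; exact hc)]
      rw [hT1, hsnoc, if_neg hc, hacc, hrep, List.append_assoc]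
      rfl

lemma rightStep (L : List Int) (m : Nat) (hm : m ≤ L.length) (i : Nat) (h2 : i + 2 ≤ m) :
    stepRightA L (List.replicate (i + 1) 1 ++ rightL ((L.take m).drop (i + 1))) ((i : Nat) : Int) =
      List.replicate i 1 ++ rightL ((L.take m).drop i) := by
  have hxlen : (L.take m).length = m := by rw [List.length_take]; omega
  have hi : i < (L.take m).length := by omega
  have hi1 : i + 1 < (L.take m).length := by omega
  have hd1 : (L.take m).drop i = (L.take m)[i] :: (L.take m).drop (i + 1) := List.drop_eq_getElem_cons hi
  have hd2 : (L.take m).drop (i + 1) = (L.take m)[i + 1] :: (L.take m).drop (i + 2) :=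
    List.drop_eq_getElem_cons hi1
  have hgi : (L.take m)[i] = L.getD i 0 := by
    rw [List.getElem_take, List.getD_eq_getElem _ _ (by omega)]
  have hgi1 : (L.take m)[i + 1] = L.getD (i + 1) 0 := by
    rw [List.getElem_take, List.getD_eq_getElem _ _ (by omega)]
  have hrd : rightL ((L.take m).drop i) =
      (if L.getD i 0 > L.getD (i + 1) 0 then (rightL ((L.take m).drop (i + 1))).headD 0 + 1 else 1) ::
        rightL ((L.take m).drop (i + 1)) := by
    conv_lhs => rw [hd1, hd2]
    rw [rightL]
    rw [← hd2, hgi, hgi1]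
  have hg1 : PySem.List.pyGetD L ((i : Nat) : Int) 0 = L.getD i 0 := PySem.List.pyGetD_natCast L i 0
  have hg2 : PySem.List.pyGetD L (((i : Nat) : Int) + 1) 0 = L.getD (i + 1) 0 := by
    rw [show ((i : Nat) : Int) + 1 = ((i + 1 : Nat) : Int) by push_cast; ring]
    exact PySem.List.pyGetD_natCast L (i + 1) 0
  obtain ⟨r, rs, hr⟩ : ∃ r rs, rightL ((L.take m).drop (i + 1)) = r :: rs := by
    have hne : (L.take m).drop (i + 1) ≠ [] := by rw [hd2]; simp
    obtain ⟨r, rs, hrr⟩ := List.exists_cons_of_ne_nil (rightL_ne_nil hne)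
    exact ⟨r, rs, hrr⟩
  have hgacc : PySem.List.pyGetD
      (List.replicate (i + 1) 1 ++ rightL ((L.take m).drop (i + 1))) (((i : Nat) : Int) + 1) 0 = r := by
    rw [show ((i : Nat) : Int) + 1 = ((i + 1 : Nat) : Int) by push_cast; ring,
      PySem.List.pyGetD_natCast, List.getD_append_right _ _ _ _ (by simp),
      List.length_replicate, Nat.sub_self, hr]
    rfl
  have hset : ∀ v : Int, (List.replicate (i + 1) 1 ++ rightL ((L.take m).drop (i + 1))).set
      (((i : Nat) : Int)).toNat v = List.replicate i 1 ++ v :: rightL ((L.take m).drop (i + 1)) := by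
    intro v
    rw [Int.toNat_natCast, List.replicate_succ', List.append_assoc, List.set_append,
      if_neg (by simp), List.length_replicate, Nat.sub_self]
    rfl
  by_cases hc : L.getD i 0 > L.getD (i + 1) 0
  · rw [stepRightA, if_pos (by rw [hg1, hg2]; exact hc), hgacc, hset, hrd, if_pos hc, hr]
    rfl
  · rw [stepRightA, if_neg (by rw [hg1, hg2]; exact hc), hrd, if_neg hc]
    rw [List.replicate_succ', List.append_assoc]
    rfl

lemma rightLoop (L : List Int) (m : Nat) (hm : m ≤ L.length) :
    ∀ (j : Nat), j + 2 ≤ m →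
    (PySem.List.pyRange (j : Int) (-1) (-1)).foldl (stepRightA L)
      (List.replicate (j + 1) 1 ++ rightL ((L.take m).drop (j + 1))) = rightL (L.take m) := by
  intro j
  induction j with
  | zero =>
    intro h2
    rw [pyRange_down_cons 0]
    rw [show ((0 : Nat) : Int) - 1 = -1 by norm_num, pyRange_down_neg, List.foldl_cons,
      List.foldl_nil, rightStep L m hm 0 h2]
    simp
  | succ j ih =>
    intro h2
    rw [pyRange_down_cons (j + 1), List.foldl_cons,
      rightStep L m hm (j + 1) h2,
      show (((j + 1 : Nat) : Int)) - 1 = ((j : Nat) : Int) by push_cast; ring]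
    exact ih (by omega)

lemma sumLoop (A B : List Int) (m : Nat) (hA : A.length = m) (hB : B.length = m) :
    (PySem.List.pyRange 0 (m : Int)).foldl
      (fun acc i => acc + max (PySem.List.pyGetD A i 0) (PySem.List.pyGetD B i 0)) 0 =
    (List.zipWith max A B).sum := by
  rw [PySem.List.foldl_add, PySem.List.pyRange_zero_natCast, List.map_map]
  have hzip : List.map
      ((fun i => max (PySem.List.pyGetD A i 0) (PySem.List.pyGetD B i 0)) ∘ (fun k : Nat => (k : Int)))
      (List.range m) = List.zipWith max A B := by
    apply List.ext_getElem
    · simp [hA, hB]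
    · intro i h1 h2
      simp only [List.getElem_map, Function.comp_apply, List.getElem_range, List.getElem_zipWith]
      have him : i < m := by simpa using h1
      rw [PySem.List.pyGetD_natCast, PySem.List.pyGetD_natCast,
        List.getD_eq_getElem _ _ (by omega), List.getD_eq_getElem _ _ (by omega)]
  rw [hzip]
  omega

lemma A_eq_ansL (L : List Int) (n : Int) (h : n ≤ (L.length : Int)) :
    chocolateDistribution L n = ansL (L.take n.toNat) := by
  by_cases hn : n ≤ 0
  · unfold chocolateDistribution
    rw [pyRange_one_empty 1 n (by omega), pyRange_one_empty 0 n (by omega),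
      pyRange_down_empty (n - 2) (by omega)]
    simp [show n.toNat = 0 from by omega, ansL, leftL, rightL]
  · have hm1 : 1 ≤ n.toNat := by omega
    have hmn : ((n.toNat : Nat) : Int) = n := by omega
    have hmL : n.toNat ≤ L.length := by omega
    obtain ⟨l0, L', rfl⟩ : ∃ l0 L', L = l0 :: L' := by
      cases L with
      | nil => simp at hmL; omega
      | cons a t => exact ⟨a, t, rfl⟩
    set L : List Int := l0 :: L' with hL
    set m : Nat := n.toNat with hmdef
    have htake1 : leftL (L.take 1) = [1] := by rw [hL]; rfl
    have hacc0 : List.replicate m (1 : Int) = leftL (L.take 1) ++ List.replicate (m - 1) 1 := by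
      rw [htake1, show m = (m - 1) + 1 by omega, List.replicate_succ]
      simp
    have hleft : (PySem.List.pyRange 1 (m : Int)).foldl (stepLeftA L) (List.replicate m 1) =
        leftL (L.take m) := by
      rw [show (1 : Int) = ((1 : Nat) : Int) by norm_num]
      exact leftLoop L m hmL (m - 1) 1 _ (by omega) (by omega) hacc0
    have hright : (PySem.List.pyRange ((m : Int) - 2) (-1) (-1)).foldl (stepRightA L)
        (List.replicate m 1) = rightL (L.take m) := by
      by_cases hm2 : m = 1
      · rw [hm2]
        rw [show ((1 : Nat) : Int) - 2 = -1 by norm_num, pyRange_down_empty (-1) (by norm_num),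
          List.foldl_nil]
        rw [hL]
        rfl
      · have hm2' : 2 ≤ m := by omega
        have hxlen : (L.take m).length = m := by rw [List.length_take]; omega
        have hdrop : (L.take m).drop (m - 1) = [(L.take m)[m - 1]'(by omega)] := by
          rw [List.drop_eq_getElem_cons (by omega)]
          congr 1
          rw [show m - 1 + 1 = m by omega]
          exact List.drop_of_length_le (by omega)
        have hacc : List.replicate m (1 : Int) =
            List.replicate (m - 2 + 1) 1 ++ rightL ((L.take m).drop (m - 2 + 1)) := by
          rw [show m - 2 + 1 = m - 1 by omega, hdrop,
            show rightL [(L.take m)[m - 1]'(by omega)] = [1] from rfl,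
            show m = (m - 1) + 1 by omega, List.replicate_succ']
          simp
        rw [show (m : Int) - 2 = ((m - 2 : Nat) : Int) by omega, hacc]
        exact rightLoop L m hmL (m - 2) (by omega)
    unfold chocolateDistribution
    rw [← hmn]
    rw [show ((m : Nat) : Int).toNat = m from Int.toNat_natCast m]
    rw [hleft, hright]
    exact sumLoop _ _ m (by rw [leftL_length, List.length_take]; omega)
      (by rw [rightL_length, List.length_take]; omega)

lemma B_eq_bans (L : List Int) (n : Int) (h : n ≤ (L.length : Int)) :
    chocolateDistribution_alt L n = bans (L.take n.toNat) := by
  by_cases hn : n ≤ 0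
  · unfold chocolateDistribution_alt
    rw [if_pos hn, show n.toNat = 0 by omega]
    rfl
  · have hm1 : 1 ≤ n.toNat := by omega
    obtain ⟨l0, L', rfl⟩ : ∃ l0 L', L = l0 :: L' := by
      cases L with
      | nil => simp at h; omega
      | cons a t => exact ⟨a, t, rfl⟩
    unfold chocolateDistribution_alt
    rw [if_neg (by omega)]
    have hslice : PySem.List.slice (l0 :: L') (some 1) (some n) = L'.take (n.toNat - 1) := by
      rw [show (1 : Int) = ((1 : Nat) : Int) by norm_num,
        show n = ((n.toNat : Nat) : Int) by omega, PySem.List.slice_natCast]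
      rfl
    have htake : (l0 :: L').take n.toNat = l0 :: L'.take (n.toNat - 1) := by
      rw [show n.toNat = (n.toNat - 1) + 1 by omega]
      rfl
    have hget : PySem.List.pyGetD (l0 :: L') 0 0 = l0 := by
      rw [show (0 : Int) = ((0 : Nat) : Int) by norm_num, PySem.List.pyGetD_natCast]
      rfl
    rw [hslice, htake, hget]
    rfl

-- ===== VERDICT (by name: the statement is the Claim_ definition above) =====
theorem chocolateDistribution_spec : Claim_equal_chocolateDistribution := by
  intro L n _ hpre
  unfold Spec_chocolateDistribution
  rw [A_eq_ansL L n hpre, B_eq_bans L n hpre, ansL_eq_bans]
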